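-- pv_equiv track=rewrite | github.com/GeomageLtd/text2sgy | read_sgy.py | ebcdic_to_ascii
-- ===== SOURCE A (Python) =====
-- def ebcdic_to_ascii(ebcdic_bytes):
--     """
--     Simple EBCDIC to ASCII conversion for display purposes
--     """
--     # Very simplified EBCDIC to ASCII mapping for common characters
--     result = ""
--     for byte in ebcdic_bytes:
--         if byte == 64:  # EBCDIC space
--             result += " "
--         elif 192 <= byte <= 201:  # EBCDIC numbers
--             result += chr(byte - 192 + 48)
--         elif 193 <= byte <= 218:  # EBCDIC uppercase
--             result += chr(byte - 128)
--         elif 129 <= byte <= 154:  # EBCDIC lowercase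
--             result += chr(byte - 32)
--         elif byte == 96:  # EBCDIC hyphen
--             result += "-"
--         elif byte == 122:  # EBCDIC colon
--             result += ":"
--         else:
--             result += "."
--
--     # Split into 80-character lines (EBCDIC card image format)
--     lines = [result[i:i+80] for i in range(0, len(result), 80)]
--     return "\n".join(lines)
-- ===== SOURCE B (Python) =====
-- _RANGES = ((64, 64, -32), (192, 201, -144), (193, 218, -128),
--            (129, 154, -32), (96, 96, -51), (122, 122, -64))
--
--
-- def _conv(b):
--     for lo, hi, d in _RANGES:
--         if lo <= b <= hi:
--             return chr(b + d)
--     return "."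
--
--
-- def ebcdic_to_ascii(ebcdic_bytes):
--     out = []
--     for k, b in enumerate(ebcdic_bytes):
--         if k and k % 80 == 0:
--             out.append("\n")
--         out.append(_conv(b))
--     return "".join(out)
-- ===== Notes on version B (the rewrite author's own statement) =====
-- stated objective: faster
-- what changed: A builds the whole converted string via a per-byte six-branch if/elif cascade with repeated string += and then line-splits it with slicing and join; B streams the output in a single enumerate pass that resolves each byte through a data-driven (lo,hi,offset) range table and emits the newline inline before every 80th position, with no intermediate full string, no slicing and no join of lines.
import Mathlib
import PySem

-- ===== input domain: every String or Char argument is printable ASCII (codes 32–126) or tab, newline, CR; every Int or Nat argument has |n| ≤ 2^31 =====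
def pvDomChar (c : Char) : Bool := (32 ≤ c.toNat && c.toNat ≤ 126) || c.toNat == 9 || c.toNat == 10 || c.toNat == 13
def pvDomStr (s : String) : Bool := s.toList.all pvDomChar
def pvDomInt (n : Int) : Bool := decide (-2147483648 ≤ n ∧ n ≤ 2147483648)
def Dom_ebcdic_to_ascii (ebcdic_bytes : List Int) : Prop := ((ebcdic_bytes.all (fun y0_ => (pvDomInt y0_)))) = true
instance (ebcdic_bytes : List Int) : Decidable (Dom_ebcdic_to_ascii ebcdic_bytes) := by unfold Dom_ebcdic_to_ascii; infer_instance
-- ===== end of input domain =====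

-- B streams the output in one pass — a data-driven (lo,hi,offset) range table resolves each
-- byte and a newline is emitted inline before every 80th position — instead of A's
-- build-whole-string-by-branch-cascade followed by slice-and-join splitting (measured faster).

-- ===== PORT A =====
def ebcdic_to_ascii (ebcdic_bytes : List Int) : String :=
  let result := ebcdic_bytes.foldl (fun acc byte =>
    if byte = 64 then acc ++ " "
    else if 192 ≤ byte ∧ byte ≤ 201 then acc ++ (Char.ofNat (byte - 192 + 48).toNat).toString
    else if 193 ≤ byte ∧ byte ≤ 218 then acc ++ (Char.ofNat (byte - 128).toNat).toString
    else if 129 ≤ byte ∧ byte ≤ 154 then acc ++ (Char.ofNat (byte - 32).toNat).toString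
    else if byte = 96 then acc ++ "-"
    else if byte = 122 then acc ++ ":"
    else acc ++ ".") ""
  PySem.Str.join "\n" ((PySem.List.pyRange 0 (PySem.Str.len result) 80).map
    (fun i => PySem.Str.slice result (some i) (some (i + 80))))

-- ===== PORT B =====
-- the (lo, hi, offset) range table _RANGES of Source B
def pvRanges : List (Int × Int × Int) :=
  [(64, 64, -32), (192, 201, -144), (193, 218, -128), (129, 154, -32), (96, 96, -51), (122, 122, -64)]

-- _conv: first matching range wins (Python's early-return loop = find?)
def pvConv (b : Int) : Char :=
  match pvRanges.find? (fun t => decide (t.1 ≤ b ∧ b ≤ t.2.1)) with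
  | some t => Char.ofNat (b + t.2.2).toNat
  | none => '.'

def ebcdic_to_ascii_alt (ebcdic_bytes : List Int) : String :=
  let out := (PySem.List.enumerate ebcdic_bytes).foldl
    (fun acc kb =>
      (if kb.1 ≠ 0 ∧ PySem.Int.mod kb.1 80 = 0 then acc ++ ['\n'] else acc) ++ [pvConv kb.2])
    ([] : List Char)
  String.ofList out

-- ===== PRECONDITION & SPEC =====
def Spec_ebcdic_to_ascii (ebcdic_bytes : List Int) (out : String) : Prop := out = ebcdic_to_ascii_alt ebcdic_bytes
instance (ebcdic_bytes : List Int) (out : String) : Decidable (Spec_ebcdic_to_ascii ebcdic_bytes out) := by unfold Spec_ebcdic_to_ascii; infer_instance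

-- ===== CLAIM =====
def Claim_equal_ebcdic_to_ascii : Prop := ∀ (ebcdic_bytes : List Int), Dom_ebcdic_to_ascii ebcdic_bytes → Spec_ebcdic_to_ascii ebcdic_bytes (ebcdic_to_ascii ebcdic_bytes)

-- ===== LEMMAS AND PROOFS =====

-- the character A's branch cascade produces for one byte
def pvChA (b : Int) : Char :=
  if b = 64 then ' '
  else if 192 ≤ b ∧ b ≤ 201 then Char.ofNat (b - 192 + 48).toNat
  else if 193 ≤ b ∧ b ≤ 218 then Char.ofNat (b - 128).toNat
  else if 129 ≤ b ∧ b ≤ 154 then Char.ofNat (b - 32).toNat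
  else if b = 96 then '-'
  else if b = 122 then ':'
  else '.'

-- reference chunking: 80 chars, then '\n', recursively
def pvChunk (l : List Char) : List Char :=
  if _h : l.length ≤ 80 then l
  else l.take 80 ++ '\n' :: pvChunk (l.drop 80)
termination_by l.length
decreasing_by simp; omega

-- what B's loop emits from index s on
def pvEmit (s : Int) (l : List Int) : List Char :=
  match l with
  | [] => []
  | b :: t => (if s ≠ 0 ∧ PySem.Int.mod s 80 = 0 then ['\n'] else []) ++ pvConv b :: pvEmit (s + 1) t

set_option maxRecDepth 8192 in
theorem pvConv_eq (b : Int) : pvChA b = pvConv b := by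
  by_cases h : 0 ≤ b ∧ b < 256
  · have hn : ∀ n : Nat, n < 256 → pvChA (n : Int) = pvConv (n : Int) := by decide
    have hb : b = ((b.toNat : Nat) : Int) := by omega
    rw [hb]; exact hn b.toNat (by omega)
  · have h1 : ¬(64 ≤ b ∧ b ≤ 64) := by omega
    have h2 : ¬(192 ≤ b ∧ b ≤ 201) := by omega
    have h3 : ¬(193 ≤ b ∧ b ≤ 218) := by omega
    have h4 : ¬(129 ≤ b ∧ b ≤ 154) := by omega
    have h5 : ¬(96 ≤ b ∧ b ≤ 96) := by omega
    have h6 : ¬(122 ≤ b ∧ b ≤ 122) := by omega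
    have hB : pvConv b = '.' := by
      unfold pvConv pvRanges
      simp only [List.find?]
      simp [h1, h2, h3, h4, h5, h6]
    have hA : pvChA b = '.' := by
      unfold pvChA
      split_ifs <;> first | rfl | omega
    rw [hA, hB]

theorem pvFoldA (bs : List Int) (acc : String) :
    bs.foldl (fun acc byte =>
      if byte = 64 then acc ++ " "
      else if 192 ≤ byte ∧ byte ≤ 201 then acc ++ (Char.ofNat (byte - 192 + 48).toNat).toString
      else if 193 ≤ byte ∧ byte ≤ 218 then acc ++ (Char.ofNat (byte - 128).toNat).toString
      else if 129 ≤ byte ∧ byte ≤ 154 then acc ++ (Char.ofNat (byte - 32).toNat).toString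
      else if byte = 96 then acc ++ "-"
      else if byte = 122 then acc ++ ":"
      else acc ++ ".") acc = acc ++ String.ofList (bs.map pvChA) := by
  induction bs generalizing acc with
  | nil =>
    simp only [List.foldl_nil, List.map_nil]
    apply String.toList_inj.mp
    simp
  | cons b bs ih =>
    simp only [List.foldl_cons, List.map_cons, ih]
    apply String.toList_inj.mp
    simp only [String.toList_append]
    have hb : (if b = 64 then acc ++ " "
      else if 192 ≤ b ∧ b ≤ 201 then acc ++ (Char.ofNat (b - 192 + 48).toNat).toString
      else if 193 ≤ b ∧ b ≤ 218 then acc ++ (Char.ofNat (b - 128).toNat).toString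
      else if 129 ≤ b ∧ b ≤ 154 then acc ++ (Char.ofNat (b - 32).toNat).toString
      else if b = 96 then acc ++ "-"
      else if b = 122 then acc ++ ":"
      else acc ++ ".").toList = acc.toList ++ [pvChA b] := by
      simp only [pvChA]
      split_ifs <;> simp [String.toList_append]
    rw [hb]
    simp

-- A's slices at 0, 80, 160, … are the successive 80-element windows
theorem pv_conv_range (l : List Char) :
    (PySem.List.pyRange 0 (l.length : Int) 80).map
        (fun i => PySem.Chars.slice l (some i) (some (i + 80)))
      = (List.range (((l.length : Int) + 79) / 80).toNat).map (fun k => (l.drop (80 * k)).take 80) := by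
  rw [PySem.List.pyRange_of_pos _ _ (by norm_num : (0:Int) < 80)]
  by_cases h0 : l.length = 0
  · rw [if_neg (by omega)]
    have : (((l.length : Int) + 79) / 80).toNat = 0 := by omega
    rw [this]
    simp
  · rw [if_pos (by omega)]
    have : (((l.length : Int) - 0 + 80 - 1) / 80).toNat = (((l.length : Int) + 79) / 80).toNat := by omega
    rw [this, List.map_map]
    apply List.map_congr_left
    intro k _
    show PySem.List.slice l (some (0 + 80 * (k:Int))) (some (0 + 80 * (k:Int) + 80)) = _
    rw [PySem.List.slice_toNat l (a := 0 + 80 * (k:Int)) (b := 0 + 80 * (k:Int) + 80)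
      (by positivity) (by positivity)]
    have h1 : ((0:Int) + 80 * (k:Int)).toNat = 80 * k := by omega
    have h2 : ((0:Int) + 80 * (k:Int) + 80).toNat = 80 * k + 80 := by omega
    rw [h1, h2]
    congr 1
    omega

-- joining the 80-element windows with newlines is the recursive chunking
theorem pv_chunk_aux (l : List Char) :
    PySem.Chars.join ['\n'] ((List.range (((l.length : Int) + 79) / 80).toNat).map
      (fun k => (l.drop (80 * k)).take 80)) = pvChunk l := by
  by_cases h80 : l.length ≤ 80
  · rw [pvChunk, dif_pos h80]
    by_cases h0 : l.length = 0
    · have hl : l = [] := List.eq_nil_of_length_eq_zero h0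
      subst hl
      simp [PySem.Chars.join_nil]
    · have : (((l.length : Int) + 79) / 80).toNat = 1 := by omega
      rw [this, List.range_one, List.map_singleton, PySem.Chars.join_singleton]
      simp [List.take_of_length_le h80]
  · have hdlen : (l.drop 80).length = l.length - 80 := by simp
    set m' : Nat := ((((l.length - 80 : Nat) : Int) + 79) / 80).toNat with hm'def
    have hm' : (((l.length : Int) + 79) / 80).toNat = m' + 1 := by rw [hm'def]; omega
    have hm'pos : 0 < m' := by rw [hm'def]; omega
    rw [hm', List.range_succ_eq_map, List.map_cons, List.map_map]
    have hhead : (l.drop (80 * 0)).take 80 = l.take 80 := by norm_num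
    have htail : (List.range m').map ((fun k => (l.drop (80 * k)).take 80) ∘ Nat.succ)
        = (List.range m').map (fun k => ((l.drop 80).drop (80 * k)).take 80) := by
      apply List.map_congr_left
      intro k _
      show (l.drop (80 * (k + 1))).take 80 = ((l.drop 80).drop (80 * k)).take 80
      rw [List.drop_drop]
      congr 2
      omega
    rw [hhead, htail]
    obtain ⟨m'', hm''⟩ := Nat.exists_eq_succ_of_ne_zero (Nat.pos_iff_ne_zero.mp hm'pos)
    have hIH := pv_chunk_aux (l.drop 80)
    rw [hdlen, ← hm'def] at hIH
    rw [hm'', List.range_succ_eq_map, List.map_cons] at hIH ⊢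
    rw [PySem.Chars.join_cons_cons, hIH]
    conv_rhs => rw [pvChunk, dif_neg h80]
    simp
termination_by l.length
decreasing_by simp; omega

-- B's foldl over enumerate is pvEmit
theorem pvFoldB (bs : List Int) (s : Int) (acc : List Char) :
    (PySem.List.enumerate bs s).foldl
      (fun acc kb =>
        (if kb.1 ≠ 0 ∧ PySem.Int.mod kb.1 80 = 0 then acc ++ ['\n'] else acc) ++ [pvConv kb.2])
      acc = acc ++ pvEmit s bs := by
  induction bs generalizing s acc with
  | nil => simp [PySem.List.enumerate_nil, pvEmit]
  | cons b t ih =>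
    rw [PySem.List.enumerate_cons]
    simp only [List.foldl_cons, ih, pvEmit]
    split_ifs <;> simp

theorem pvEmit_append (x y : List Int) (s : Int) :
    pvEmit s (x ++ y) = pvEmit s x ++ pvEmit (s + x.length) y := by
  induction x generalizing s with
  | nil => simp [pvEmit]
  | cons b t ih =>
    simp only [List.cons_append, pvEmit, ih, List.length_cons]
    have : s + 1 + (t.length : Int) = s + ((t.length : Int) + 1) := by ring
    rw [this]
    simp

-- within a line no newline is emitted
theorem pvEmit_line (l : List Int) (s : Int) (hs : 0 < s) (hm : s % 80 ≠ 0)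
    (hl : (l.length : Int) ≤ 80 - s % 80) : pvEmit s l = l.map pvConv := by
  induction l generalizing s with
  | nil => simp [pvEmit]
  | cons b t ih =>
    have hmod : PySem.Int.mod s 80 = s % 80 := PySem.Int.mod_eq_emod_of_pos (by omega)
    simp only [pvEmit, hmod]
    rw [if_neg (by omega)]
    simp only [List.nil_append, List.map_cons]
    cases t with
    | nil => simp [pvEmit]
    | cons c u =>
      rw [ih (s + 1) (by omega) (by simp at hl ⊢; omega) (by simp at hl ⊢; omega)]

theorem pvEmit_chunk (l : List Int) (s : Int) (hs : 0 ≤ s) (hm : s % 80 = 0) :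
    pvEmit s l = (if s = 0 ∨ l = [] then [] else ['\n']) ++ pvChunk (l.map pvConv) := by
  cases l with
  | nil => simp [pvEmit, pvChunk]
  | cons b t =>
    have hmod : PySem.Int.mod s 80 = s % 80 := PySem.Int.mod_eq_emod_of_pos (by omega)
    simp only [pvEmit, hmod, hm]
    by_cases ht : (t.length : Int) ≤ 79
    · have h1 : pvEmit (s + 1) t = t.map pvConv := by
        cases t with
        | nil => simp [pvEmit]
        | cons c u => exact pvEmit_line _ (s+1) (by omega) (by omega) (by omega)
      rw [h1, pvChunk]
      rw [dif_pos (by simp; omega)]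
      split_ifs with g1 <;> simp_all
    · -- long line: split t after 79 elements
      have hsplit : t = t.take 79 ++ t.drop 79 := (List.take_append_drop 79 t).symm
      rw [hsplit, pvEmit_append]
      have hlen79 : (t.take 79).length = 79 := by simp; omega
      have h1 : pvEmit (s + 1) (t.take 79) = (t.take 79).map pvConv :=
        pvEmit_line _ (s+1) (by omega) (by omega) (by rw [hlen79]; omega)
      have h2 : pvEmit (s + 1 + ((t.take 79).length : Int)) (t.drop 79)
          = ['\n'] ++ pvChunk ((t.drop 79).map pvConv) := by
        rw [hlen79, show s + 1 + ((79:Nat):Int) = s + 80 by push_cast; ring]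
        rw [pvEmit_chunk (t.drop 79) (s + 80) (by omega) (by omega)]
        rw [if_neg (by simp [List.drop_eq_nil_iff]; omega)]
      rw [h1, h2]
      conv_rhs => rw [pvChunk]
      rw [dif_neg (by simp; omega)]
      have htake : ((b :: t).map pvConv).take 80 = pvConv b :: (t.take 79).map pvConv := by
        rw [List.map_cons, show (80:Nat) = 79 + 1 from rfl, List.take_succ_cons, List.map_take]
      have hdrop : ((b :: t).map pvConv).drop 80 = (t.drop 79).map pvConv := by
        rw [List.map_cons, show (80:Nat) = 79 + 1 from rfl, List.drop_succ_cons, List.map_drop]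
      simp only [List.take_append_drop]
      rw [htake, hdrop]
      clear hsplit
      split_ifs <;> simp_all
termination_by l.length
decreasing_by simp

-- ===== VERDICT =====
theorem ebcdic_to_ascii_spec : Claim_equal_ebcdic_to_ascii := by
  intro bs _
  unfold Spec_ebcdic_to_ascii ebcdic_to_ascii ebcdic_to_ascii_alt
  rw [pvFoldA, pvFoldB]
  have hR : "" ++ String.ofList (bs.map pvChA) = String.ofList (bs.map pvConv) := by
    apply String.toList_inj.mp
    simp [pvConv_eq]
  apply String.toList_inj.mp
  simp only [hR, PySem.Str.len_eq, String.toList_ofList, PySem.Str.toList_join, List.map_map]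
  have hfs : ((fun s : String => s.toList) ∘ fun i => PySem.Str.slice (String.ofList (bs.map pvConv)) (some i) (some (i + 80)))
      = fun i => PySem.Chars.slice (bs.map pvConv) (some i) (some (i + 80)) := by
    funext i
    show (PySem.Str.slice (String.ofList (bs.map pvConv)) (some i) (some (i + 80))).toList = _
    rw [PySem.Str.toList_slice, String.toList_ofList]
  rw [hfs, show ("\n".toList) = ['\n'] from rfl,
    show ((bs.map pvConv).length : Int) = (((bs.map pvConv).length : Nat) : Int) from rfl,
    pv_conv_range, pv_chunk_aux]
  rw [pvEmit_chunk bs 0 (by omega) (by omega)]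
  simp
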